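-- pv_equiv track=rewrite | github.com/NotSaminnn/BVP_Layer_01 | tests/hallucination/download_coco.py | _infer_scene_type
-- ===== SOURCE A (Python) =====
-- def _infer_scene_type(objects: list) -> str:
--     """Infer scene type from objects present."""
--     objects_set = set(obj.lower() for obj in objects)
--
--     # Kitchen indicators
--     kitchen_objects = {'refrigerator', 'microwave', 'oven', 'sink', 'toaster',
--                       'knife', 'fork', 'spoon', 'bowl', 'cup', 'bottle'}
--     if len(objects_set & kitchen_objects) >= 2:
--         return 'kitchen'
--
--     # Living room indicators
--     living_room_objects = {'couch', 'tv', 'remote', 'chair', 'book', 'vase'}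
--     if len(objects_set & living_room_objects) >= 2:
--         return 'living_room'
--
--     # Office indicators
--     office_objects = {'laptop', 'keyboard', 'mouse', 'monitor', 'desk', 'chair'}
--     if len(objects_set & office_objects) >= 2:
--         return 'office'
--
--     # Outdoor indicators
--     outdoor_objects = {'car', 'bicycle', 'motorcycle', 'bus', 'truck', 'traffic light',
--                       'bench', 'bird', 'cat', 'dog', 'horse'}
--     if len(objects_set & outdoor_objects) >= 2:
--         return 'outdoor'
--
--     # Default
--     return 'general'
-- ===== SOURCE B (Python) =====
-- _SCENE_INDICATORS = {
--     'kitchen': ('refrigerator', 'microwave', 'oven', 'sink', 'toaster',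
--                 'knife', 'fork', 'spoon', 'bowl', 'cup', 'bottle'),
--     'living_room': ('couch', 'tv', 'remote', 'chair', 'book', 'vase'),
--     'office': ('laptop', 'keyboard', 'mouse', 'monitor', 'desk', 'chair'),
--     'outdoor': ('car', 'bicycle', 'motorcycle', 'bus', 'truck', 'traffic light',
--                 'bench', 'bird', 'cat', 'dog', 'horse'),
-- }
--
-- # inverted index: indicator object -> list of scene names containing it
-- _OBJECT_INDEX = {}
-- for _scene, _objs in _SCENE_INDICATORS.items():
--     for _o in _objs:
--         _OBJECT_INDEX.setdefault(_o, []).append(_scene)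
--
--
-- def _infer_scene_type(objects: list) -> str:
--     """Infer scene type via an inverted object->scenes index."""
--     tags = []
--     seen = set()
--     for obj in objects:
--         name = obj.lower()
--         if name not in seen:
--             seen.add(name)
--             tags.extend(_OBJECT_INDEX.get(name, ()))
--     for scene in _SCENE_INDICATORS:
--         if tags.count(scene) >= 2:
--             return scene
--     return 'general'
-- ===== Notes on version B (the rewrite author's own statement) =====
-- stated objective: alternative
-- what changed: B replaces A's four hard-coded set intersections with an inverted index (object -> scenes containing it, built once from a scene table): one dedup pass over the objects collects scene tags via index lookup, then a generic loop over the table returns the first scene tagged at least twice.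
import Mathlib
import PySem

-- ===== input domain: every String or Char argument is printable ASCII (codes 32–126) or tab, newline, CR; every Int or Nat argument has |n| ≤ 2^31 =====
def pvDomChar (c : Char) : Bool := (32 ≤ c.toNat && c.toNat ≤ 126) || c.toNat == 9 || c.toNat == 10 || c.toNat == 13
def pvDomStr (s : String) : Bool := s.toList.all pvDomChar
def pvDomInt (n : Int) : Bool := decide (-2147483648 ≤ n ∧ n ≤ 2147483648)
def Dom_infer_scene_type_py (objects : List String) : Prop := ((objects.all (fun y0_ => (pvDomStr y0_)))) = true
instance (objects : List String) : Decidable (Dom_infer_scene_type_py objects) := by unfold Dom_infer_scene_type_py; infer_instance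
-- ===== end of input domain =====

-- B replaces A's four set intersections by an inverted object->scenes index: one dedup pass collects scene tags, then the first scene tagged >= 2 times wins (alternative decomposition, not claimed faster).


-- ===== PORT A =====
def pvKitchenA : PySem.Set String := PySem.Set.ofList ["refrigerator", "microwave", "oven", "sink", "toaster", "knife", "fork", "spoon", "bowl", "cup", "bottle"]
def pvLivingA : PySem.Set String := PySem.Set.ofList ["couch", "tv", "remote", "chair", "book", "vase"]
def pvOfficeA : PySem.Set String := PySem.Set.ofList ["laptop", "keyboard", "mouse", "monitor", "desk", "chair"]
def pvOutdoorA : PySem.Set String := PySem.Set.ofList ["car", "bicycle", "motorcycle", "bus", "truck", "traffic light", "bench", "bird", "cat", "dog", "horse"]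

def infer_scene_type_py (objects : List String) : String :=
  let objects_set : PySem.Set String := PySem.Set.ofList (objects.map PySem.Str.lower)
  if 2 ≤ (PySem.Set.inter objects_set pvKitchenA).length then "kitchen"
  else if 2 ≤ (PySem.Set.inter objects_set pvLivingA).length then "living_room"
  else if 2 ≤ (PySem.Set.inter objects_set pvOfficeA).length then "office"
  else if 2 ≤ (PySem.Set.inter objects_set pvOutdoorA).length then "outdoor"
  else "general"

-- ===== PORT B =====
-- the scene -> indicator-objects table (Source B's _SCENE_INDICATORS, in dict insertion order)
def pvSceneIndicators : List (String × List String) :=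
  [("kitchen", ["refrigerator", "microwave", "oven", "sink", "toaster", "knife", "fork", "spoon", "bowl", "cup", "bottle"]),
   ("living_room", ["couch", "tv", "remote", "chair", "book", "vase"]),
   ("office", ["laptop", "keyboard", "mouse", "monitor", "desk", "chair"]),
   ("outdoor", ["car", "bicycle", "motorcycle", "bus", "truck", "traffic light", "bench", "bird", "cat", "dog", "horse"])]

-- Source B's module-level loop building the inverted index (setdefault(o, []).append(scene) = modify o [] (· ++ [scene]))
def pvObjectIndex : PySem.Dict String (List String) :=
  pvSceneIndicators.foldl
    (fun d p => p.2.foldl (fun d o => d.modify o [] (fun l => l ++ [p.1])) d)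
    PySem.Dict.empty

-- one iteration of Source B's collection loop: dedup on the fly, extend tags by the index entry
def pvStepB (st : PySem.Set String × List String) (obj : String) : PySem.Set String × List String :=
  let name := PySem.Str.lower obj
  if PySem.Set.contains st.1 name then st
  else (PySem.Set.add st.1 name, st.2 ++ PySem.Dict.getD pvObjectIndex name [])

-- Source B's final loop: first scene (in table order) with tags.count(scene) >= 2
def pvPick (tags : List String) : List (String × List String) → String
  | [] => "general"
  | (s, _) :: rest => if 2 ≤ PySem.List.count tags s then s else pvPick tags rest

def infer_scene_type_py_alt (objects : List String) : String :=
  let st := objects.foldl pvStepB (PySem.Set.empty, [])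
  pvPick st.2 pvSceneIndicators

-- ===== PRECONDITION & SPEC =====
def Spec_infer_scene_type_py (objects : List String) (out : String) : Prop := out = infer_scene_type_py_alt objects
instance (objects : List String) (out : String) : Decidable (Spec_infer_scene_type_py objects out) := by unfold Spec_infer_scene_type_py; infer_instance

-- ===== CLAIM (what is proved, stated in full; the proofs are below) =====
def Claim_equal_infer_scene_type_py : Prop := ∀ (objects : List String), Dom_infer_scene_type_py objects → Spec_infer_scene_type_py objects (infer_scene_type_py objects)

-- ===== LEMMAS AND PROOFS =====

-- the keys of the inverted index, in insertion order
def pvAllKeys : List String := ["refrigerator", "microwave", "oven", "sink", "toaster", "knife", "fork", "spoon", "bowl", "cup", "bottle", "couch", "tv", "remote", "chair", "book", "vase", "laptop", "keyboard", "mouse", "monitor", "desk", "car", "bicycle", "motorcycle", "bus", "truck", "traffic light", "bench", "bird", "cat", "dog", "horse"]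

-- an index entry mentions scene c once iff the name is one of c's indicators, zero times otherwise
set_option maxRecDepth 8192 in
lemma pvIdxCount (c : String) (K : List String)
    (hkeys : ∀ n ∈ pvAllKeys, (PySem.Dict.getD pvObjectIndex n []).count c = if n ∈ K then 1 else 0)
    (hKsub : ∀ n ∈ K, n ∈ pvAllKeys)
    (n : String) :
    (PySem.Dict.getD pvObjectIndex n []).count c = if n ∈ K then 1 else 0 := by
  by_cases hk : n ∈ pvAllKeys
  · exact hkeys n hk
  · rw [PySem.Dict.getD_of_not_contains, if_neg (fun hm => hk (hKsub n hm))]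
    · rfl
    · simp only [PySem.Dict.contains_eq_decide_mem_keys, decide_eq_false_iff_not]
      intro hmem
      exact hk (by
        have hke : pvObjectIndex.keys = pvAllKeys := by rfl
        rwa [hke] at hmem)

set_option maxRecDepth 8192 in
lemma pvIdxKitchen (n : String) :
    (PySem.Dict.getD pvObjectIndex n []).count "kitchen" = if n ∈ pvKitchenA then 1 else 0 := by
  refine pvIdxCount _ _ ?_ (by decide) n
  intro m hm; fin_cases hm <;> decide

set_option maxRecDepth 8192 in
lemma pvIdxLiving (n : String) :
    (PySem.Dict.getD pvObjectIndex n []).count "living_room" = if n ∈ pvLivingA then 1 else 0 := by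
  refine pvIdxCount _ _ ?_ (by decide) n
  intro m hm; fin_cases hm <;> decide

set_option maxRecDepth 8192 in
lemma pvIdxOffice (n : String) :
    (PySem.Dict.getD pvObjectIndex n []).count "office" = if n ∈ pvOfficeA then 1 else 0 := by
  refine pvIdxCount _ _ ?_ (by decide) n
  intro m hm; fin_cases hm <;> decide

set_option maxRecDepth 8192 in
lemma pvIdxOutdoor (n : String) :
    (PySem.Dict.getD pvObjectIndex n []).count "outdoor" = if n ∈ pvOutdoorA then 1 else 0 := by
  refine pvIdxCount _ _ ?_ (by decide) n
  intro m hm; fin_cases hm <;> decide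

-- A's intersection length is a countP over the lowered set
lemma pvInterLen (s K : List String) :
    (PySem.Set.inter s (PySem.Set.ofList K)).length = s.countP (fun a => decide (a ∈ PySem.Set.ofList K)) := by
  simp [PySem.Set.inter, List.countP_eq_length_filter]

-- the set component of B's fold is exactly A's incrementally built lowered set
lemma pvFoldFst (xs : List String) : ∀ (seen : PySem.Set String) (tags : List String),
    (xs.foldl pvStepB (seen, tags)).1 = xs.foldl (fun s x => PySem.Set.add s (PySem.Str.lower x)) seen := by
  induction xs with
  | nil => intro seen tags; rfl
  | cons x xs ih =>
    intro seen tags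
    simp only [List.foldl_cons]
    by_cases hc : PySem.Set.contains seen (PySem.Str.lower x)
    · have hm : PySem.Str.lower x ∈ seen := (PySem.Set.contains_iff seen _).mp hc
      rw [show pvStepB (seen, tags) x = (seen, tags) by simp [pvStepB, hm],
          PySem.Set.add_of_mem hm]
      exact ih seen tags
    · have hm : PySem.Str.lower x ∉ seen := fun h => hc ((PySem.Set.contains_iff seen _).mpr h)
      rw [show pvStepB (seen, tags) x =
            (PySem.Set.add seen (PySem.Str.lower x),
             tags ++ PySem.Dict.getD pvObjectIndex (PySem.Str.lower x) []) by simp [pvStepB, hm]]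
      exact ih _ _

-- invariant: the tag list always counts scene c as often as the seen-set meets c's indicator set
lemma pvFoldCount (c : String) (K : PySem.Set String)
    (hidx : ∀ n, (PySem.Dict.getD pvObjectIndex n []).count c = if n ∈ K then 1 else 0)
    (xs : List String) : ∀ (seen : PySem.Set String) (tags : List String),
    tags.count c = seen.countP (fun a => decide (a ∈ K)) →
    ((xs.foldl pvStepB (seen, tags)).2).count c =
      ((xs.foldl pvStepB (seen, tags)).1).countP (fun a => decide (a ∈ K)) := by
  induction xs with
  | nil => intro seen tags h; simpa using h
  | cons x xs ih =>
    intro seen tags h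
    simp only [List.foldl_cons]
    by_cases hc : PySem.Set.contains seen (PySem.Str.lower x)
    · rw [show pvStepB (seen, tags) x = (seen, tags) by
        simp [pvStepB, (PySem.Set.contains_iff seen _).mp hc]]
      exact ih seen tags h
    · have hm : PySem.Str.lower x ∉ seen := fun h' => hc ((PySem.Set.contains_iff seen _).mpr h')
      rw [show pvStepB (seen, tags) x =
            (PySem.Set.add seen (PySem.Str.lower x),
             tags ++ PySem.Dict.getD pvObjectIndex (PySem.Str.lower x) []) by simp [pvStepB, hm]]
      refine ih _ _ ?_
      rw [PySem.Set.add_of_not_mem hm, List.count_append, List.countP_append, h, hidx]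
      simp [List.countP_singleton]

-- ===== VERDICT (by name: the statement is the Claim_ definition above) =====
theorem infer_scene_type_py_spec : Claim_equal_infer_scene_type_py := by
  intro objects _
  unfold Spec_infer_scene_type_py infer_scene_type_py infer_scene_type_py_alt
  have hfold : PySem.Set.ofList (objects.map PySem.Str.lower) =
      objects.foldl (fun s x => PySem.Set.add s (PySem.Str.lower x)) PySem.Set.empty := by
    simp [PySem.Set.ofList_eq_foldl, List.foldl_map, PySem.Set.empty]
  have hfst := pvFoldFst objects PySem.Set.empty []
  have hk := pvFoldCount "kitchen" pvKitchenA pvIdxKitchen objects PySem.Set.empty [] (by rfl)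
  have hl := pvFoldCount "living_room" pvLivingA pvIdxLiving objects PySem.Set.empty [] (by rfl)
  have ho := pvFoldCount "office" pvOfficeA pvIdxOffice objects PySem.Set.empty [] (by rfl)
  have hd := pvFoldCount "outdoor" pvOutdoorA pvIdxOutdoor objects PySem.Set.empty [] (by rfl)
  rw [hfst, ← hfold] at hk hl ho hd
  simp only [pvPick, pvSceneIndicators, PySem.List.count_eq, hk, hl, ho, hd,
    pvKitchenA, pvLivingA, pvOfficeA, pvOutdoorA, pvInterLen]
  rfl
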